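-- pv_equiv track=rewrite | github.com/securifybv/php-screw-brute | php-screw-brute.py | recover_key_bytes
-- ===== SOURCE A (Python) =====
-- def recover_key_bytes(ciphertexts, knownplaintext, min = 5, max = 32):
-- 	keys = []
--
-- 	for l in range(min, max + 1):
-- 		possible_match = True
-- 		key = []
-- 		for x in range(0, l):
-- 			key.append(None)
--
-- 		for ciphertext in ciphertexts:
-- 			for i in range(0, len(knownplaintext)):
-- 				index = (len(ciphertext) - i) % len(key)
-- 				c = (ciphertext[i] ^ ~knownplaintext[i]) & 0xFF
-- 				if key[index] == None:
-- 					key[index] = c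
-- 				elif key[index] != c:
-- 					possible_match = False
--
-- 		if possible_match:
-- 			keys.append(key)
--
-- 	return keys
-- ===== SOURCE B (Python) =====
-- def recover_key_bytes(ciphertexts, knownplaintext, min=5, max=32):
-- 	# Different algorithm: a length l is ruled out exactly when two constraints that
-- 	# demand different key bytes collide modulo l, i.e. l divides the difference of
-- 	# their offsets.  So build the deduplicated (offset, byte) constraint list once,
-- 	# compute the offset-differences of all conflicting pairs, and test each l by
-- 	# divisibility -- no per-length conflict table is ever built.
-- 	if max < min:
-- 		return []
-- 	pairs = [(len(ct) - i, (ct[i] ^ ~knownplaintext[i]) & 0xFF)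
-- 	         for ct in ciphertexts for i in range(len(knownplaintext))]
-- 	constraints = list(dict.fromkeys(pairs))
-- 	diffs = list(dict.fromkeys(abs(p[0] - q[0])
-- 	             for p in constraints for q in constraints if p[1] != q[1]))
-- 	keys = []
-- 	for l in range(min, max + 1):
-- 		if any(d % l == 0 for d in diffs):
-- 			continue
-- 		key = [None] * l
-- 		for o, c in constraints:
-- 			key[o % l] = c
-- 		keys.append(key)
-- 	return keys
-- ===== Notes on version B (the rewrite author's own statement) =====
-- stated objective: alternative
-- what changed: B replaces A's per-length conflict-table scan with a divisibility test: it dedups the (offset, xor-byte) constraints once, computes the offset differences of all conflicting constraint pairs, rejects a length l exactly when l divides one of those differences, and only for surviving lengths writes the key by direct assignment; Pre_ excludes only inputs where A raises (min<1 with nonempty inputs, or a ciphertext shorter than the known plaintext).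
import Mathlib
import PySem

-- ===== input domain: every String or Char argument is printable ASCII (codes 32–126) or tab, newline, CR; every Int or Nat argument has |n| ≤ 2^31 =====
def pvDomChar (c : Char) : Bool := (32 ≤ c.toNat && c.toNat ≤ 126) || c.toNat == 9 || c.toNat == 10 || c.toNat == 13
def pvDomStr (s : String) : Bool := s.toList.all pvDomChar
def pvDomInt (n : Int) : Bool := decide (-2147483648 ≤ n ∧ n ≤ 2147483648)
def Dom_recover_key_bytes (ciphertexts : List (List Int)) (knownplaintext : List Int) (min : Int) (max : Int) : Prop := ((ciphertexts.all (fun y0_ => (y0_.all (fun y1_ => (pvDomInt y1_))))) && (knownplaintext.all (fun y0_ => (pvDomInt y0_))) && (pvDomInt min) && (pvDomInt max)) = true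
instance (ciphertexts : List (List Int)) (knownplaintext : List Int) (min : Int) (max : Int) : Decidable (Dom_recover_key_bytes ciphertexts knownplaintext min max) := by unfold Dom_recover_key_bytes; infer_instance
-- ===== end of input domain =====

-- B rules a key length out by a divisibility test on the offset differences of
-- conflicting constraint pairs instead of A's per-length conflict table (objective: alternative).

-- ===== PORT A =====
-- one (ciphertext, i) step of A's inner loops; `key.length` plays len(key)
def pvStepA (st : Bool × List (Option Int)) (p : Int × Int) : Bool × List (Option Int) :=
  match (PySem.List.pyGet? st.2 (PySem.Int.mod p.1 (st.2.length : Int))).getD none with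
  | none => (st.1, PySem.List.pySetD st.2 (PySem.Int.mod p.1 (st.2.length : Int)) (some p.2))
  | some v => if v ≠ p.2 then (false, st.2) else st

def recover_key_bytes (ciphertexts : List (List Int)) (knownplaintext : List Int) (min : Int) (max : Int) : List (List (Option Int)) :=
  (PySem.List.pyRange min (max + 1) 1).foldl (fun keys l =>
    let key : List (Option Int) :=
      (PySem.List.pyRange 0 l 1).foldl (fun key _ => key ++ [(none : Option Int)]) []
    let st := ciphertexts.foldl (fun st ciphertext =>
      (PySem.List.pyRange 0 (knownplaintext.length : Int) 1).foldl (fun st i =>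
        -- index/c computed as in A; ~x = -x-1; pyGet? in-range under Pre_
        pvStepA st (((ciphertext.length : Int) - i),
          PySem.Int.band (PySem.Int.bxor ((PySem.List.pyGet? ciphertext i).getD 0)
            (-((PySem.List.pyGet? knownplaintext i).getD 0) - 1)) 255)) st) (true, key)
    if st.1 then keys ++ [st.2] else keys) []

-- ===== PORT B =====
def recover_key_bytes_alt (ciphertexts : List (List Int)) (knownplaintext : List Int) (min : Int) (max : Int) : List (List (Option Int)) :=
  if max < min then [] else
  let pairs : List (Int × Int) := ciphertexts.flatMap (fun ct =>
    (PySem.List.pyRange 0 (knownplaintext.length : Int) 1).map (fun i =>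
      (((ct.length : Int) - i),
        PySem.Int.band (PySem.Int.bxor ((PySem.List.pyGet? ct i).getD 0)
          (-((PySem.List.pyGet? knownplaintext i).getD 0) - 1)) 255)))
  let constraints := PySem.List.dedup pairs              -- list(dict.fromkeys(pairs))
  let diffs := PySem.List.dedup (constraints.flatMap (fun p =>
    constraints.filterMap (fun q => if p.2 ≠ q.2 then some |p.1 - q.1| else none)))
  (PySem.List.pyRange min (max + 1) 1).foldl (fun keys l =>
    if diffs.any (fun d => PySem.Int.mod d l == 0) then keys
    else keys ++ [constraints.foldl (fun key p =>
      PySem.List.pySetD key (PySem.Int.mod p.1 l) (some p.2)) (List.replicate l.toNat none)]) []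

-- ===== PRECONDITION & SPEC =====
-- Pre_ excludes exactly the inputs on which A raises: with a nonempty length range and
-- nonempty ciphertexts and plaintext, A divides by len(key)=0 when min < 1
-- (ZeroDivisionError), and indexes past a ciphertext shorter than the plaintext (IndexError).
def Pre_recover_key_bytes (ciphertexts : List (List Int)) (knownplaintext : List Int) (min : Int) (max : Int) : Prop :=
  (min ≤ max ∧ ciphertexts ≠ [] ∧ knownplaintext ≠ []) →
    (1 ≤ min ∧ ∀ ct ∈ ciphertexts, knownplaintext.length ≤ ct.length)
instance (ciphertexts : List (List Int)) (knownplaintext : List Int) (min : Int) (max : Int) : Decidable (Pre_recover_key_bytes ciphertexts knownplaintext min max) := by unfold Pre_recover_key_bytes; infer_instance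

def pvWitness_recover_key_bytes : List (List Int) × List Int × Int × Int := ([[10, 20, 30]], [65, 66], 1, 4)

def Spec_recover_key_bytes (ciphertexts : List (List Int)) (knownplaintext : List Int) (min : Int) (max : Int) (out : List (List (Option Int))) : Prop := out = recover_key_bytes_alt ciphertexts knownplaintext min max
instance (ciphertexts : List (List Int)) (knownplaintext : List Int) (min : Int) (max : Int) (out : List (List (Option Int))) : Decidable (Spec_recover_key_bytes ciphertexts knownplaintext min max out) := by unfold Spec_recover_key_bytes; infer_instance

-- ===== CLAIM (what is proved, stated in full; the proofs are below) =====
def Claim_equal_recover_key_bytes : Prop := ∀ (ciphertexts : List (List Int)) (knownplaintext : List Int) (min : Int) (max : Int), Dom_recover_key_bytes ciphertexts knownplaintext min max → Pre_recover_key_bytes ciphertexts knownplaintext min max → Spec_recover_key_bytes ciphertexts knownplaintext min max (recover_key_bytes ciphertexts knownplaintext min max)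

-- ===== LEMMAS AND PROOFS =====

-- A's nested loops (over ciphertexts, then positions) are one fold over the flattened pair list
theorem pv_foldl_nest {α β γ σ : Type} (xs : List α) (f : α → List β) (h : α → β → γ)
    (g : σ → γ → σ) (s : σ) :
    xs.foldl (fun s x => (f x).foldl (fun s y => g s (h x y)) s) s =
      (xs.flatMap (fun x => (f x).map (h x))).foldl g s := by
  induction xs generalizing s with
  | nil => rfl
  | cons a xs ih =>
    rw [List.flatMap_cons, List.foldl_append, List.foldl_map, List.foldl_cons, ih]

theorem pv_get (xs : List (Option Int)) (j : Int) (h0 : 0 ≤ j) :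
    PySem.List.pyGet? xs j = xs[j.toNat]? := by
  obtain ⟨n, rfl⟩ := Int.eq_ofNat_of_zero_le h0
  simp [PySem.List.pyGet?_natCast xs n]

-- index of a constraint for length l (Python offset % l)
def pvIdx (l : Int) (p : Int × Int) : Int := PySem.Int.mod p.1 l

-- consistency of a constraint list at length l: same index forces the same byte
def pvConsB (l : Int) (C : List (Int × Int)) : Bool :=
  C.all (fun p => C.all (fun q => !(pvIdx l p == pvIdx l q) || p.2 == q.2))

theorem pvConsB_iff (l : Int) (C : List (Int × Int)) :
    pvConsB l C = true ↔ ∀ p ∈ C, ∀ q ∈ C, pvIdx l p = pvIdx l q → p.2 = q.2 := by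
  simp [pvConsB, Decidable.imp_iff_not_or]

-- the key both loops compute: position j holds the byte of the FIRST constraint at index j
def pvKeyOf (l : Int) (P : List (Int × Int)) : List (Option Int) :=
  (PySem.List.pyRange 0 l 1).map (fun j => (P.find? (fun p => pvIdx l p == j)).map Prod.snd)

theorem pv_keyOf_length (l : Int) (P : List (Int × Int)) : (pvKeyOf l P).length = l.toNat := by
  simp [pvKeyOf, PySem.List.length_pyRange_one]

theorem pv_keyOf_nil (l : Int) : pvKeyOf l [] = List.replicate l.toNat none := by
  simp [pvKeyOf, List.map_const', PySem.List.length_pyRange_one]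

theorem pv_keyOf_getElem (l : Int) (P : List (Int × Int)) (j : Nat) (hj : j < l.toNat) :
    (pvKeyOf l P)[j]'(by simp [pv_keyOf_length, hj]) =
      (P.find? (fun p => pvIdx l p == (j : Int))).map Prod.snd := by
  simp only [pvKeyOf, List.getElem_map]
  rw [PySem.List.getElem_pyRange_one]
  simp

-- appending a constraint with a fresh index changes neither consistency ...
theorem pv_consB_restrict (l : Int) (P : List (Int × Int)) (p : Int × Int)
    (h : pvConsB l (P ++ [p]) = true) : pvConsB l P = true :=
  (pvConsB_iff _ _).mpr (fun a ha b hb =>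
    (pvConsB_iff _ _).mp h a (by simp [ha]) b (by simp [hb]))

theorem pv_consB_append_none (l : Int) (P : List (Int × Int)) (p : Int × Int)
    (hnone : ∀ q ∈ P, ¬ pvIdx l q = pvIdx l p) :
    pvConsB l (P ++ [p]) = pvConsB l P := by
  cases hPb : pvConsB l P with
  | false =>
    rw [Bool.eq_false_iff]
    intro h
    rw [pv_consB_restrict l P p h] at hPb
    cases hPb
  | true =>
    apply (pvConsB_iff _ _).mpr
    have hcons := (pvConsB_iff _ _).mp hPb
    intro a ha b hb hab
    rcases List.mem_append.mp ha with ha | ha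
    · rcases List.mem_append.mp hb with hb | hb
      · exact hcons a ha b hb hab
      · have hbp := List.mem_singleton.mp hb
        rw [hbp] at hab ⊢
        exact absurd hab (hnone a ha)
    · have hap := List.mem_singleton.mp ha
      rcases List.mem_append.mp hb with hb | hb
      · rw [hap] at hab ⊢
        exact absurd hab.symm (hnone b hb)
      · rw [hap, List.mem_singleton.mp hb]

-- ... nor the key beyond position pvIdx l p
theorem pv_keyOf_append_none (l : Int) (hl : 1 ≤ l) (P : List (Int × Int)) (p : Int × Int)
    (hnone : P.find? (fun q => pvIdx l q == pvIdx l p) = none) :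
    pvKeyOf l (P ++ [p]) = PySem.List.pySetD (pvKeyOf l P) (pvIdx l p) (some p.2) := by
  have h0 : 0 ≤ pvIdx l p := PySem.Int.mod_nonneg _ (by omega)
  have hlt : pvIdx l p < l := PySem.Int.mod_lt _ (by omega)
  have hcast : ((pvIdx l p).toNat : Int) = pvIdx l p := Int.toNat_of_nonneg h0
  rw [PySem.List.pySetD_of_nonneg _ _ h0]
  apply List.ext_getElem
  · simp [pv_keyOf_length]
  · intro j hj1 hj2
    have hjl : j < l.toNat := by simpa [pv_keyOf_length] using hj1
    rw [pv_keyOf_getElem l (P ++ [p]) j hjl, List.getElem_set, pv_keyOf_getElem l P j hjl,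
      List.find?_append]
    by_cases hj : (pvIdx l p).toNat = j
    · have hji : (j : Int) = pvIdx l p := by omega
      rw [if_pos hj, hji, hnone]
      simp [pvIdx]
    · have hji : ¬ pvIdx l p = (j : Int) := by omega
      rw [if_neg hj]
      have hb : (pvIdx l p == (j : Int)) = false := beq_eq_false_iff_ne.mpr hji
      have : List.find? (fun q => pvIdx l q == (j : Int)) [p] = none := by
        simp [List.find?, hb]
      rw [this]
      cases P.find? (fun q => pvIdx l q == (j : Int)) <;> rfl

-- appending a constraint whose index is already occupied leaves the key unchanged
theorem pv_keyOf_append_some (l : Int) (P : List (Int × Int)) (p q0 : Int × Int)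
    (hs : P.find? (fun q => pvIdx l q == pvIdx l p) = some q0) :
    pvKeyOf l (P ++ [p]) = pvKeyOf l P := by
  unfold pvKeyOf
  apply List.map_congr_left
  intro j _
  rw [List.find?_append]
  cases hPj : P.find? (fun q => pvIdx l q == j) with
  | some x => rfl
  | none =>
    by_cases hji : pvIdx l p = j
    · subst hji; rw [hPj] at hs; cases hs
    · have hb : (pvIdx l p == j) = false := beq_eq_false_iff_ne.mpr hji
      have : List.find? (fun q => pvIdx l q == j) [p] = none := by
        simp [List.find?, hb]
      rw [this]
      rfl

-- consistency is preserved when the occupying constraint agrees …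
theorem pv_consB_append_some (l : Int) (P : List (Int × Int)) (p q0 : Int × Int)
    (hs : P.find? (fun q => pvIdx l q == pvIdx l p) = some q0) (he : q0.2 = p.2) :
    pvConsB l (P ++ [p]) = pvConsB l P := by
  have hq0P : q0 ∈ P := List.mem_of_find?_eq_some hs
  have hq0i : pvIdx l q0 = pvIdx l p := by simpa using List.find?_some hs
  cases hPb : pvConsB l P with
  | false =>
    rw [Bool.eq_false_iff]
    intro h
    rw [pv_consB_restrict l P p h] at hPb
    cases hPb
  | true =>
    apply (pvConsB_iff _ _).mpr
    have h := (pvConsB_iff _ _).mp hPb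
    intro a ha b hb hab
    rcases List.mem_append.mp ha with ha | ha
    · rcases List.mem_append.mp hb with hb | hb
      · exact h a ha b hb hab
      · have hbp := List.mem_singleton.mp hb
        rw [hbp] at hab ⊢
        rw [← he]; exact h a ha q0 hq0P (by rw [hab, hq0i])
    · have hap := List.mem_singleton.mp ha
      rcases List.mem_append.mp hb with hb | hb
      · rw [hap] at hab ⊢
        rw [← he]; exact (h b hb q0 hq0P (by rw [← hab, hq0i])).symm
      · rw [hap, List.mem_singleton.mp hb]

-- … and destroyed when it disagrees
theorem pv_consB_append_conflict (l : Int) (P : List (Int × Int)) (p q0 : Int × Int)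
    (hs : P.find? (fun q => pvIdx l q == pvIdx l p) = some q0) (he : ¬ q0.2 = p.2) :
    pvConsB l (P ++ [p]) = false := by
  have hq0P : q0 ∈ P := List.mem_of_find?_eq_some hs
  have hq0i : pvIdx l q0 = pvIdx l p := by simpa using List.find?_some hs
  rw [Bool.eq_false_iff]
  intro h
  exact he ((pvConsB_iff l (P ++ [p])).mp h q0 (by simp [hq0P]) p (by simp) hq0i)

-- one A-step from the invariant state re-establishes the invariant with the constraint appended
theorem pv_stepA_eq (l : Int) (hl : 1 ≤ l) (P : List (Int × Int)) (p : Int × Int) :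
    pvStepA (pvConsB l P, pvKeyOf l P) p = (pvConsB l (P ++ [p]), pvKeyOf l (P ++ [p])) := by
  have h0 : 0 ≤ pvIdx l p := PySem.Int.mod_nonneg _ (by omega)
  have hlt : pvIdx l p < l := PySem.Int.mod_lt _ (by omega)
  have hjlt : (pvIdx l p).toNat < l.toNat := by omega
  have hcast : ((pvIdx l p).toNat : Int) = pvIdx l p := Int.toNat_of_nonneg h0
  have hlen : (((pvKeyOf l P).length : Nat) : Int) = l := by rw [pv_keyOf_length]; omega
  have hget : (PySem.List.pyGet? (pvKeyOf l P)
        (PySem.Int.mod p.1 ((pvKeyOf l P).length : Int))).getD none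
      = (P.find? (fun q => pvIdx l q == pvIdx l p)).map Prod.snd := by
    rw [hlen]
    rw [show PySem.Int.mod p.1 l = pvIdx l p from rfl, pv_get _ _ h0,
      List.getElem?_eq_getElem (by rw [pv_keyOf_length]; exact hjlt),
      pv_keyOf_getElem l P _ hjlt]
    rw [Option.getD_some]
    congr 2
    funext q
    rw [hcast]
  unfold pvStepA
  rw [hget]
  cases hf : P.find? (fun q => pvIdx l q == pvIdx l p) with
  | none =>
    rw [Option.map_none]
    refine Prod.ext ?_ ?_
    · exact (pv_consB_append_none l P p (fun q hq =>
        by simpa using List.find?_eq_none.mp hf q hq)).symm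
    · show PySem.List.pySetD (pvKeyOf l P) (PySem.Int.mod p.1 ((pvKeyOf l P).length : Int))
          (some p.2) = pvKeyOf l (P ++ [p])
      rw [hlen]
      exact (pv_keyOf_append_none l hl P p hf).symm
  | some q0 =>
    rw [Option.map_some]
    show (if q0.2 ≠ p.2 then ((false : Bool), (pvConsB l P, pvKeyOf l P).2)
        else (pvConsB l P, pvKeyOf l P)) = (pvConsB l (P ++ [p]), pvKeyOf l (P ++ [p]))
    by_cases he : q0.2 = p.2
    · rw [if_neg (by simpa using he)]
      exact Prod.ext (pv_consB_append_some l P p q0 hf he).symm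
        (pv_keyOf_append_some l P p q0 hf).symm
    · rw [if_pos (by simpa using he)]
      exact Prod.ext (pv_consB_append_conflict l P p q0 hf he).symm
        (pv_keyOf_append_some l P p q0 hf).symm

theorem pv_foldA (l : Int) (hl : 1 ≤ l) (C P : List (Int × Int)) :
    C.foldl pvStepA (pvConsB l P, pvKeyOf l P) = (pvConsB l (P ++ C), pvKeyOf l (P ++ C)) := by
  induction C generalizing P with
  | nil => simp
  | cons p C ih =>
    rw [List.foldl_cons, pv_stepA_eq l hl P p, ih (P ++ [p]), List.append_assoc]
    rfl

-- one B-step (last-wins assignment) also re-establishes the invariant, under consistency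
theorem pv_stepB_eq (l : Int) (hl : 1 ≤ l) (P : List (Int × Int)) (p : Int × Int)
    (hc : ∀ q ∈ P, pvIdx l q = pvIdx l p → q.2 = p.2) :
    PySem.List.pySetD (pvKeyOf l P) (PySem.Int.mod p.1 l) (some p.2) = pvKeyOf l (P ++ [p]) := by
  cases hf : P.find? (fun q => pvIdx l q == pvIdx l p) with
  | none => exact (pv_keyOf_append_none l hl P p hf).symm
  | some q0 =>
    have h0 : 0 ≤ pvIdx l p := PySem.Int.mod_nonneg _ (by omega)
    have hlt : pvIdx l p < l := PySem.Int.mod_lt _ (by omega)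
    have hq0P : q0 ∈ P := List.mem_of_find?_eq_some hf
    have hq0i : pvIdx l q0 = pvIdx l p := by simpa using List.find?_some hf
    have he : q0.2 = p.2 := hc q0 hq0P hq0i
    rw [pv_keyOf_append_some l P p q0 hf,
      show PySem.Int.mod p.1 l = pvIdx l p from rfl,
      PySem.List.pySetD_of_nonneg _ _ h0]
    apply List.ext_getElem
    · simp
    · intro j hj1 hj2
      have hjl : j < l.toNat := by simpa [pv_keyOf_length] using hj2
      rw [List.getElem_set, pv_keyOf_getElem l P j hjl]
      by_cases hj : (pvIdx l p).toNat = j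
      · have hji : (j : Int) = pvIdx l p := by omega
        rw [if_pos hj, hji, hf, Option.map_some, he]
      · rw [if_neg hj]

theorem pv_foldB (l : Int) (hl : 1 ≤ l) (D P : List (Int × Int))
    (hc : pvConsB l (P ++ D) = true) :
    D.foldl (fun key p => PySem.List.pySetD key (PySem.Int.mod p.1 l) (some p.2)) (pvKeyOf l P)
      = pvKeyOf l (P ++ D) := by
  induction D generalizing P with
  | nil => simp
  | cons p D ih =>
    rw [List.foldl_cons, pv_stepB_eq l hl P p, ih (P ++ [p]) (by rwa [List.append_assoc]; )]
    · rw [List.append_assoc]; rfl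
    · intro q hq hidx
      exact (pvConsB_iff l (P ++ p :: D)).mp hc q (by simp [hq]) p (by simp) hidx

-- the invariant key depends on the constraint list only through membership, once consistent
theorem pv_keyOf_cong (l : Int) (C D : List (Int × Int)) (hmem : ∀ x, x ∈ D ↔ x ∈ C)
    (hc : pvConsB l C = true) : pvKeyOf l D = pvKeyOf l C := by
  unfold pvKeyOf
  apply List.map_congr_left
  intro j _
  cases hD : D.find? (fun q => pvIdx l q == j) with
  | none =>
    cases hC : C.find? (fun q => pvIdx l q == j) with
    | none => rfl
    | some y =>
      have hyD : y ∈ D := (hmem y).mpr (List.mem_of_find?_eq_some hC)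
      have := List.find?_eq_none.mp hD y hyD
      rw [List.find?_some hC] at this
      cases this rfl
  | some x =>
    cases hC : C.find? (fun q => pvIdx l q == j) with
    | none =>
      have hxC : x ∈ C := (hmem x).mp (List.mem_of_find?_eq_some hD)
      have := List.find?_eq_none.mp hC x hxC
      rw [List.find?_some hD] at this
      cases this rfl
    | some y =>
      have hxC : x ∈ C := (hmem x).mp (List.mem_of_find?_eq_some hD)
      have hyC : y ∈ C := List.mem_of_find?_eq_some hC
      have hxj : pvIdx l x = j := by simpa using List.find?_some hD
      have hyj : pvIdx l y = j := by simpa using List.find?_some hC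
      have : x.2 = y.2 := (pvConsB_iff l C).mp hc x hxC y hyC (by rw [hxj, hyj])
      simp [this]

theorem pv_consB_cong (l : Int) (C D : List (Int × Int)) (hmem : ∀ x, x ∈ D ↔ x ∈ C) :
    pvConsB l D = pvConsB l C := by
  rw [Bool.eq_iff_iff, pvConsB_iff, pvConsB_iff]
  constructor
  · intro h a ha b hb; exact h a ((hmem a).mpr ha) b ((hmem b).mpr hb)
  · intro h a ha b hb; exact h a ((hmem a).mp ha) b ((hmem b).mp hb)

-- the divisibility test on conflicting offset differences detects exactly inconsistency
theorem pv_diffs_any (l : Int) (hl : 1 ≤ l) (D : List (Int × Int)) :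
    ((PySem.List.dedup (D.flatMap (fun p =>
        D.filterMap (fun q => if p.2 ≠ q.2 then some |p.1 - q.1| else none)))).any
      (fun d => PySem.Int.mod d l == 0)) = !pvConsB l D := by
  have hdvd : ∀ p q : Int × Int, (PySem.Int.mod |p.1 - q.1| l = 0 ↔ pvIdx l p = pvIdx l q) := by
    intro p q
    rw [PySem.Int.mod_eq_zero_iff_dvd, dvd_abs,
      show pvIdx l p = PySem.Int.mod p.1 l from rfl,
      show pvIdx l q = PySem.Int.mod q.1 l from rfl,
      PySem.Int.mod_eq_emod_of_pos (by omega), PySem.Int.mod_eq_emod_of_pos (by omega)]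
    constructor
    · intro h
      have h' : l ∣ q.1 - p.1 := by
        have := (Int.dvd_neg (a := l)).mpr h
        rwa [neg_sub] at this
      exact Int.modEq_iff_dvd.mpr h'
    · intro h
      have h' : l ∣ q.1 - p.1 := Int.ModEq.dvd h
      have := (Int.dvd_neg (a := l)).mpr h'
      rwa [neg_sub] at this
  rw [Bool.eq_iff_iff, List.any_eq_true, Bool.not_eq_eq_eq_not, Bool.not_true,
    Bool.eq_false_iff]
  constructor
  · rintro ⟨d, hd, hmod⟩ hcons
    rw [PySem.List.mem_dedup, List.mem_flatMap] at hd
    obtain ⟨p, hp, hd⟩ := hd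
    rw [List.mem_filterMap] at hd
    obtain ⟨q, hq, hdq⟩ := hd
    by_cases hne : p.2 = q.2
    · rw [if_neg (by simp [hne])] at hdq; cases hdq
    · rw [if_pos hne] at hdq
      obtain rfl := Option.some_injective _ hdq
      have hidx : pvIdx l p = pvIdx l q := (hdvd p q).mp (by simpa using hmod)
      exact hne ((pvConsB_iff l D).mp hcons p hp q hq hidx)
  · intro hncons
    have : ¬ ∀ p ∈ D, ∀ q ∈ D, pvIdx l p = pvIdx l q → p.2 = q.2 := by
      intro h; exact hncons ((pvConsB_iff l D).mpr h)
    push Not at this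
    obtain ⟨p, hp, q, hq, hidx, hne⟩ := this
    refine ⟨|p.1 - q.1|, ?_, by simpa using (hdvd p q).mpr hidx⟩
    rw [PySem.List.mem_dedup, List.mem_flatMap]
    exact ⟨p, hp, by rw [List.mem_filterMap]; exact ⟨q, hq, by rw [if_pos hne]⟩⟩

-- ===== VERDICT (by name: the statement is the Claim_ definition above) =====
theorem recover_key_bytes_spec : Claim_equal_recover_key_bytes := by
  intro cts kp mn mx _ hpre
  unfold Spec_recover_key_bytes recover_key_bytes recover_key_bytes_alt
  by_cases hrange : mx < mn
  · rw [if_pos hrange,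
      show PySem.List.pyRange mn (mx + 1) 1 = [] from PySem.List.pyRange_one_eq_nil (by omega)]
    rfl
  rw [if_neg hrange]
  set C : List (Int × Int) := cts.flatMap (fun ciphertext =>
    (PySem.List.pyRange 0 (kp.length : Int) 1).map (fun i =>
      (((ciphertext.length : Int) - i),
        PySem.Int.band (PySem.Int.bxor ((PySem.List.pyGet? ciphertext i).getD 0)
          (-((PySem.List.pyGet? kp i).getD 0) - 1)) 255))) with hCdef
  have hA : ∀ st, cts.foldl (fun st ciphertext =>
      (PySem.List.pyRange 0 (kp.length : Int) 1).foldl (fun st i =>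
        pvStepA st (((ciphertext.length : Int) - i),
          PySem.Int.band (PySem.Int.bxor ((PySem.List.pyGet? ciphertext i).getD 0)
            (-((PySem.List.pyGet? kp i).getD 0) - 1)) 255)) st) st = C.foldl pvStepA st := by
    intro st
    rw [hCdef]
    exact pv_foldl_nest cts (fun _ => PySem.List.pyRange 0 (kp.length : Int) 1)
      (fun ciphertext i => (((ciphertext.length : Int) - i),
        PySem.Int.band (PySem.Int.bxor ((PySem.List.pyGet? ciphertext i).getD 0)
          (-((PySem.List.pyGet? kp i).getD 0) - 1)) 255)) pvStepA st
  apply PySem.List.foldl_congr_mem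
  intro keys l hmem
  simp only [hA]
  -- A's initial key list is the all-None invariant key
  have hkey0 : (PySem.List.pyRange 0 l 1).foldl (fun key _ => key ++ [(none : Option Int)]) []
      = pvKeyOf l [] := by
    rw [PySem.List.foldl_append_singleton_eq_map (f := fun _ => (none : Option Int)),
      pv_keyOf_nil]
    simp [List.map_const', PySem.List.length_pyRange_one]
  by_cases hC : C = []
  · rw [hC]
    simp only [List.foldl_nil]
    rw [hkey0, pv_keyOf_nil]
    rfl
  · have hl : 1 ≤ l := by
      have hcts : cts ≠ [] := by rintro rfl; simp [hCdef] at hC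
      have hkp : kp ≠ [] := by rintro rfl; simp [hCdef] at hC
      obtain ⟨h1, h2⟩ := PySem.List.mem_pyRange_one.mp hmem
      have := (hpre ⟨by omega, hcts, hkp⟩).1
      omega
    have hmemD : ∀ x, x ∈ PySem.List.dedup C ↔ x ∈ C := fun x => PySem.List.mem_dedup C x
    have hflag := pv_diffs_any l hl (PySem.List.dedup C)
    rw [pv_consB_cong l C (PySem.List.dedup C) hmemD] at hflag
    have hfold := pv_foldA l hl C []
    have e0 : pvConsB l ([] : List (Int × Int)) = true := rfl
    rw [e0] at hfold
    simp only [List.nil_append] at hfold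
    rw [hkey0, hfold, hflag]
    by_cases hcons : pvConsB l C = true
    · rw [hcons]
      simp only [Bool.not_true, Bool.false_eq_true, if_false, if_true]
      have hD := pv_foldB l hl (PySem.List.dedup C) []
        (by simpa using pv_consB_cong l C (PySem.List.dedup C) hmemD ▸ hcons)
      simp only [List.nil_append] at hD
      rw [pv_keyOf_nil] at hD
      rw [hD, pv_keyOf_cong l C (PySem.List.dedup C) hmemD hcons]
    · have hf : pvConsB l C = false := by revert hcons; cases pvConsB l C <;> simp
      rw [hf]
      simp
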